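-- pv_equiv track=rewrite | github.com/sng87/paradigm-scripts | bin/mParadigm.py | getUpstream
-- ===== SOURCE A (Python) =====
-- from copy import deepcopy
--
-- def reverseInteractions(interactions):
--     """reverse interaction mapping"""
--     rinteractions = {}
--     for source in interactions.keys():
--         for target in interactions[source].keys():
--             if target not in rinteractions:
--                 rinteractions[target] = {}
--             rinteractions[target][source] = interactions[source][target]
--     return(rinteractions)
--
-- def getUpstream(node, distance, interactions):
--     """returns downstream neighbors of distance"""
--     rinteractions = reverseInteractions(interactions)
--     seenNodes = set([node])
--     borderNodes = [node]
--     frontierNodes = []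
--     for dist in range(distance):
--         while len(borderNodes) > 0:
--             currNode = borderNodes.pop()
--             if currNode in rinteractions:
--                 for i in rinteractions[currNode].keys():
--                     if i not in seenNodes:
--                         seenNodes.update([i])
--                         frontierNodes.append(i)
--         borderNodes = deepcopy(frontierNodes)
--         frontierNodes = []
--     return(list(seenNodes))
-- ===== SOURCE B (Python) =====
-- def getUpstream(node, distance, interactions):
--     """returns upstream neighbors within the given distance
--
--     Same BFS as the original but without building a reverse-interaction
--     index: to expand a node we scan the interactions dict directly and
--     take every source whose target dict contains the current node.
--     """
--     seenNodes = set([node])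
--     borderNodes = [node]
--     for dist in range(distance):
--         if not borderNodes:
--             break
--         frontierNodes = []
--         while borderNodes:
--             currNode = borderNodes.pop()
--             for source in interactions:
--                 if currNode in interactions[source] and source not in seenNodes:
--                     seenNodes.add(source)
--                     frontierNodes.append(source)
--         borderNodes = frontierNodes
--     return list(seenNodes)
-- ===== Notes on version B (the rewrite author's own statement) =====
-- stated objective: simpler
-- what changed: B drops the reverseInteractions pre-built reverse index entirely: each border node is expanded by scanning the interactions dict directly for sources whose target dict contains the current node (and B breaks out of the level loop once the frontier is empty).
import Mathlib
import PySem

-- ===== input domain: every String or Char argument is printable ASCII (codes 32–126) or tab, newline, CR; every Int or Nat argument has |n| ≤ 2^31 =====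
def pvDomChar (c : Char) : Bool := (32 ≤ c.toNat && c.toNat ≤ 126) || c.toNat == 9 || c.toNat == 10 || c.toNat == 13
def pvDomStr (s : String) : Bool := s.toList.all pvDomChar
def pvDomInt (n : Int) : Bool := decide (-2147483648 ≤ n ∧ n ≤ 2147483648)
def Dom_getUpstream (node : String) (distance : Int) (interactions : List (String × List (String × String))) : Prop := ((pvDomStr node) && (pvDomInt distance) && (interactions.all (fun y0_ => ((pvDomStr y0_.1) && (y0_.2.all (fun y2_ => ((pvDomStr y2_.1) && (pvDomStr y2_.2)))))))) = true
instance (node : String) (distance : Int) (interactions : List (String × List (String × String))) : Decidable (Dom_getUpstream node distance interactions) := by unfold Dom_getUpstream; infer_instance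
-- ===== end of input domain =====

-- B drops the reverseInteractions index and expands each border node by scanning the
-- interactions dict directly (simpler, no reverse map); return value only — A mutates nothing.

-- ===== PORT A =====
-- reverseInteractions: build the reverse map target ↦ {source ↦ value}
def pvRevStep (r : PySem.Dict String (PySem.Dict String String))
    (p : String × List (String × String)) : PySem.Dict String (PySem.Dict String String) :=
  p.2.foldl (fun r t =>
    let r1 := if r.contains t.1 then r else r.insert t.1 PySem.Dict.empty
    r1.modify t.1 PySem.Dict.empty (fun d => d.insert p.1 t.2)) r

def pvRevIns (interactions : List (String × List (String × String))) :
    PySem.Dict String (PySem.Dict String String) :=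
  interactions.foldl pvRevStep PySem.Dict.empty

-- body of A's while-loop for one popped node: look curr up in the reverse map,
-- add each unseen predecessor to seen and to the frontier
def pvExpandA (r : PySem.Dict String (PySem.Dict String String)) (curr : String)
    (st : PySem.Set String × List String) : PySem.Set String × List String :=
  match r.get? curr with
  | none => st
  | some d => d.keys.foldl
      (fun st i => if st.1.contains i then st else (PySem.Set.add st.1 i, st.2 ++ [i])) st

-- the while-loop pops from the END of borderNodes, so it is recursion over border.reverse
def pvWhileA (r : PySem.Dict String (PySem.Dict String String)) :
    List String → PySem.Set String × List String → PySem.Set String × List String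
  | [], st => st
  | curr :: rest, st => pvWhileA r rest (pvExpandA r curr st)

-- for dist in range(distance)
def pvLevelsA (r : PySem.Dict String (PySem.Dict String String)) :
    Nat → List String → PySem.Set String → PySem.Set String
  | 0, _, seen => seen
  | n + 1, border, seen =>
    let st := pvWhileA r border.reverse (seen, [])
    pvLevelsA r n st.2 st.1

def getUpstream (node : String) (distance : Int) (interactions : List (String × List (String × String))) : List String :=
  pvLevelsA (pvRevIns interactions) distance.toNat [node] (PySem.Set.ofList [node])

-- ===== PORT B =====
-- expand one popped node by scanning interactions: every source whose target dict
-- contains curr is an upstream neighbor; add it when unseen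
def pvExpandB (interactions : List (String × List (String × String))) (curr : String)
    (st : PySem.Set String × List String) : PySem.Set String × List String :=
  interactions.foldl
    (fun st p =>
      if (p.2.map Prod.fst).contains curr && !(st.1.contains p.1)
      then (PySem.Set.add st.1 p.1, st.2 ++ [p.1]) else st) st

-- while borderNodes: pop from the end = recursion over border.reverse
def pvWhileB (interactions : List (String × List (String × String))) :
    List String → PySem.Set String × List String → PySem.Set String × List String
  | [], st => st
  | curr :: rest, st => pvWhileB interactions rest (pvExpandB interactions curr st)

-- for dist in range(distance), with B's 'if not borderNodes: break'
def pvLevelsB (interactions : List (String × List (String × String))) :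
    Nat → List String → PySem.Set String → PySem.Set String
  | 0, _, seen => seen
  | n + 1, border, seen =>
    if border = [] then seen
    else
      let st := pvWhileB interactions border.reverse (seen, [])
      pvLevelsB interactions n st.2 st.1

def getUpstream_alt (node : String) (distance : Int) (interactions : List (String × List (String × String))) : List String :=
  pvLevelsB interactions distance.toNat [node] (PySem.Set.ofList [node])

-- ===== PRECONDITION & SPEC =====
def Spec_getUpstream (node : String) (distance : Int) (interactions : List (String × List (String × String))) (out : List String) : Prop := out = getUpstream_alt node distance interactions
instance (node : String) (distance : Int) (interactions : List (String × List (String × String))) (out : List String) : Decidable (Spec_getUpstream node distance interactions out) := by unfold Spec_getUpstream; infer_instance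

-- ===== CLAIM (what is proved, stated in full; the proofs are below) =====
def Claim_equal_getUpstream : Prop := ∀ (node : String) (distance : Int) (interactions : List (String × List (String × String))), Dom_getUpstream node distance interactions → Spec_getUpstream node distance interactions (getUpstream node distance interactions)

-- ===== LEMMAS AND PROOFS =====

-- the shared "add if unseen" step, used only by the proofs
def pvUpd (st : PySem.Set String × List String) (i : String) : PySem.Set String × List String :=
  if st.1.contains i then st else (PySem.Set.add st.1 i, st.2 ++ [i])

-- B's guarded add of a source into a key set, used only by the proofs
def pvAddIf (c : String) (ks : PySem.Set String) (p : String × List (String × String)) : PySem.Set String :=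
  if (p.2.map Prod.fst).contains c then PySem.Set.add ks p.1 else ks

-- the shared "add if unseen" step, used only by the proofs
lemma pv_upd_of_contains (st : PySem.Set String × List String) (i : String)
    (h : st.1.contains i = true) : pvUpd st i = st := by
  unfold pvUpd; rw [if_pos h]

lemma pv_contains_iff (l : List String) (x : String) : l.contains x = true ↔ x ∈ l := by simp

lemma pv_getD_step (r : PySem.Dict String (PySem.Dict String String)) (tk src v c : String) :
    ((if r.contains tk then r else r.insert tk PySem.Dict.empty).modify tk PySem.Dict.empty
        (fun d => d.insert src v)).getD c PySem.Dict.empty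
      = if c = tk then (r.getD c PySem.Dict.empty).insert src v
        else r.getD c PySem.Dict.empty := by
  by_cases hc : c = tk
  · subst hc
    rw [if_pos rfl, PySem.Dict.getD_modify_self]
    by_cases hk : r.contains c = true
    · rw [if_pos hk]
    · rw [if_neg hk, PySem.Dict.getD_insert_self,
          PySem.Dict.getD_of_not_contains r PySem.Dict.empty (by simpa using hk)]
  · rw [if_neg hc, PySem.Dict.getD_modify_of_ne _ _ _ hc]
    by_cases hk : r.contains tk = true
    · rw [if_pos hk]
    · rw [if_neg hk, PySem.Dict.getD_insert_of_ne _ _ _ hc]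

lemma pv_keys_insert_add (d : PySem.Dict String String) (k v : String) :
    (d.insert k v).keys = PySem.Set.add d.keys k := by
  by_cases hk : d.contains k = true
  · rw [PySem.Dict.keys_insert_of_contains _ _ hk,
        PySem.Set.add_of_mem ((PySem.Dict.contains_iff_mem_keys _ _).mp hk)]
  · rw [PySem.Dict.keys_insert_of_not_contains _ _ (by simpa using hk),
        PySem.Set.add_of_not_mem (fun hm => hk ((PySem.Dict.contains_iff_mem_keys _ _).mpr hm))]

lemma pv_mem_foldl_upd (ks : List String) (st : PySem.Set String × List String) (x : String)
    (hx : x ∈ st.1 ∨ x ∈ ks) : x ∈ (List.foldl pvUpd st ks).1 := by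
  induction ks generalizing st with
  | nil => simpa using hx
  | cons i ks ih =>
      refine ih (pvUpd st i) ?_
      rcases hx with hst | hks
      · left
        unfold pvUpd
        split
        · exact hst
        · exact (PySem.Set.mem_add _ _ _).mpr (Or.inl hst)
      · rcases List.mem_cons.mp hks with rfl | h
        · left
          unfold pvUpd
          split
          · next hcon => exact (pv_contains_iff _ _).mp hcon
          · exact (PySem.Set.mem_add _ _ _).mpr (Or.inr rfl)
        · right; exact h

lemma pv_keys_revStep (tgts : List (String × String)) (src : String)
    (r : PySem.Dict String (PySem.Dict String String)) (c : String) :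
    (((pvRevStep r (src, tgts)).getD c PySem.Dict.empty)).keys
      = pvAddIf c ((r.getD c PySem.Dict.empty).keys) (src, tgts) := by
  induction tgts generalizing r with
  | nil => simp [pvRevStep, pvAddIf]
  | cons t rest ih =>
      have hstep : pvRevStep r (src, t :: rest)
          = pvRevStep ((if r.contains t.1 then r else r.insert t.1 PySem.Dict.empty).modify t.1
              PySem.Dict.empty (fun d => d.insert src t.2)) (src, rest) := rfl
      rw [hstep, ih, pv_getD_step]
      by_cases hc : c = t.1
      · rw [if_pos hc, pv_keys_insert_add]
        simp only [pvAddIf, List.map_cons, List.contains_cons]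
        have hbeq : (c == t.1) = true := beq_iff_eq.mpr hc
        rw [hbeq, Bool.true_or, if_pos rfl]
        by_cases hr : ((rest.map Prod.fst).contains c) = true
        · rw [if_pos hr, PySem.Set.add_of_mem ((PySem.Set.mem_add _ _ _).mpr (Or.inr rfl))]
        · rw [if_neg hr]
      · rw [if_neg hc]
        simp only [pvAddIf, List.map_cons, List.contains_cons]
        have hbeq : (c == t.1) = false := beq_eq_false_iff_ne.mpr hc
        rw [hbeq, Bool.false_or]

lemma pv_keys_revIns (inter : List (String × List (String × String)))
    (r : PySem.Dict String (PySem.Dict String String)) (c : String) :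
    ((List.foldl pvRevStep r inter).getD c PySem.Dict.empty).keys
      = List.foldl (pvAddIf c) ((r.getD c PySem.Dict.empty).keys) inter := by

  induction inter generalizing r with
  | nil => rfl
  | cons p rest ih =>
      obtain ⟨src, tgts⟩ := p
      calc ((List.foldl pvRevStep r ((src, tgts) :: rest)).getD c PySem.Dict.empty).keys
          = ((List.foldl pvRevStep (pvRevStep r (src, tgts)) rest).getD c PySem.Dict.empty).keys := rfl
        _ = List.foldl (pvAddIf c) (((pvRevStep r (src, tgts)).getD c PySem.Dict.empty).keys) rest := ih _
        _ = List.foldl (pvAddIf c) (pvAddIf c ((r.getD c PySem.Dict.empty).keys) (src, tgts)) rest := by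
              rw [pv_keys_revStep]
        _ = List.foldl (pvAddIf c) ((r.getD c PySem.Dict.empty).keys) ((src, tgts) :: rest) := rfl


lemma pv_expandA_eq_foldl (r : PySem.Dict String (PySem.Dict String String)) (c : String)
    (st : PySem.Set String × List String) :
    pvExpandA r c st = List.foldl pvUpd st ((r.getD c PySem.Dict.empty).keys) := by
  cases h : r.get? c with
  | none =>
      simp only [pvExpandA, h]
      rw [PySem.Dict.getD_of_get?_eq_none r PySem.Dict.empty h, PySem.Dict.keys_empty,
          List.foldl_nil]
  | some d =>
      simp only [pvExpandA, h]
      rw [PySem.Dict.getD_of_get?_eq_some r PySem.Dict.empty h]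
      rfl

lemma pv_expandB_eq_foldl (inter : List (String × List (String × String))) (c : String)
    (st : PySem.Set String × List String) :
    pvExpandB inter c st
      = List.foldl (fun st p => if (p.2.map Prod.fst).contains c then pvUpd st p.1 else st) st inter := by
  unfold pvExpandB
  refine List.foldl_ext _ _ st (fun st' p _ => ?_)
  by_cases hb : p.1 ∈ st'.1
  · have hb' : st'.1.contains p.1 = true := (pv_contains_iff _ _).mpr hb
    cases ha : (p.2.map Prod.fst).contains c <;> simp [pvUpd, ha, hb', hb]
  · cases ha : (p.2.map Prod.fst).contains c <;> simp [pvUpd, ha, hb]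

lemma pv_fold_fusion (inter : List (String × List (String × String))) (c : String)
    (st : PySem.Set String × List String) :
    List.foldl pvUpd st (List.foldl (pvAddIf c) [] inter)
      = List.foldl (fun st p => if (p.2.map Prod.fst).contains c then pvUpd st p.1 else st) st inter := by
  induction inter using List.reverseRecOn with
  | nil => rfl
  | append_singleton inter p ih =>
      simp only [List.foldl_append, List.foldl_cons, List.foldl_nil]
      by_cases ha : ((p.2.map Prod.fst).contains c) = true
      · simp only [pvAddIf]
        rw [if_pos ha, if_pos ha]
        by_cases hm : p.1 ∈ List.foldl (pvAddIf c) [] inter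
        · have hcon : (List.foldl pvUpd st (List.foldl (pvAddIf c) [] inter)).1.contains p.1 = true :=
            (pv_contains_iff _ _).mpr (pv_mem_foldl_upd _ st p.1 (Or.inr hm))
          rw [PySem.Set.add_of_mem hm, ← ih, pv_upd_of_contains _ _ hcon]
        · rw [PySem.Set.add_of_not_mem hm, List.foldl_append, List.foldl_cons, List.foldl_nil, ih]
      · simp only [pvAddIf]
        rw [if_neg ha, if_neg ha, ih]

lemma pv_expand_eq (inter : List (String × List (String × String))) (c : String)
    (st : PySem.Set String × List String) :
    pvExpandA (pvRevIns inter) c st = pvExpandB inter c st := by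

  rw [pv_expandA_eq_foldl, pvRevIns, pv_keys_revIns]
  simp only [PySem.Dict.getD_empty, PySem.Dict.keys_empty]
  rw [pv_fold_fusion, ← pv_expandB_eq_foldl]


lemma pv_while_eq (inter : List (String × List (String × String))) (border : List String)
    (st : PySem.Set String × List String) :
    pvWhileA (pvRevIns inter) border st = pvWhileB inter border st := by
  induction border generalizing st with
  | nil => rfl
  | cons curr rest ih =>
      simp only [pvWhileA, pvWhileB, pv_expand_eq, ih]

lemma pv_levelsA_nil (r : PySem.Dict String (PySem.Dict String String)) (n : Nat)
    (seen : PySem.Set String) : pvLevelsA r n [] seen = seen := by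
  induction n with
  | zero => rfl
  | succ n ih => simpa [pvLevelsA, pvWhileA] using ih

lemma pv_levels_eq (inter : List (String × List (String × String))) (n : Nat)
    (border : List String) (seen : PySem.Set String) :
    pvLevelsA (pvRevIns inter) n border seen = pvLevelsB inter n border seen := by
  induction n generalizing border seen with
  | zero => rfl
  | succ n ih =>
      by_cases hb : border = []
      · subst hb
        simp [pvLevelsB, pvLevelsA, pvWhileA, pv_levelsA_nil]
      · simp only [pvLevelsA, pvLevelsB, if_neg hb, pv_while_eq, ih]

-- ===== VERDICT (by name: the statement is the Claim_ definition above) =====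
theorem getUpstream_spec : Claim_equal_getUpstream := by
  intro node distance interactions _
  unfold Spec_getUpstream getUpstream getUpstream_alt
  exact pv_levels_eq interactions distance.toNat [node] (PySem.Set.ofList [node])
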